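-- pv_equiv track=rewrite | github.com/EmYeuVatLy/AIB3_LUCVIHOANGDE_VONG2 | final/source_code/core/evidence/evidence_verifier.py | _extract_candidate_windows
-- ===== SOURCE A (Python) =====
-- def _extract_candidate_windows(
--     evidence: str, content: str, window_size: int = 500
-- ) -> list[str]:
--     """Extract windows from content that might contain the evidence."""
--     key_words = [w for w in evidence.split()[:5] if len(w) >= 4]
--     windows = []
--     for word in key_words:
--         pos = content.find(word)
--         while pos >= 0 and len(windows) < 6:
--             start = max(0, pos - window_size // 2)
--             end = min(len(content), pos + window_size // 2)
--             windows.append(content[start:end])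
--             pos = content.find(word, pos + 1)
--     return windows or [content[:window_size]]
-- ===== SOURCE B (Python) =====
-- def _extract_candidate_windows(evidence, content, window_size=500):
--     key_words = [w for w in evidence.split()[:5] if len(w) >= 4]
--     half = window_size // 2
--     n = len(content)
--     windows = [
--         content[max(0, i - half):min(n, i + half)]
--         for w in key_words
--         for i in range(n - len(w) + 1)
--         if content[i:i + len(w)] == w
--     ]
--     return windows[:6] or [content[:window_size]]
-- ===== Notes on version B (the rewrite author's own statement) =====
-- stated objective: alternative
-- what changed: B abandons the repeated str.find scanning loop entirely: for each keyword it tests every index of content once by slice comparison content[i:i+len(w)] == w inside one flat comprehension over range(), and applies the 6-window cap once at the end, instead of A's find/find(pos+1) chase with the cap enforced inside the nested loop.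
import Mathlib
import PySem

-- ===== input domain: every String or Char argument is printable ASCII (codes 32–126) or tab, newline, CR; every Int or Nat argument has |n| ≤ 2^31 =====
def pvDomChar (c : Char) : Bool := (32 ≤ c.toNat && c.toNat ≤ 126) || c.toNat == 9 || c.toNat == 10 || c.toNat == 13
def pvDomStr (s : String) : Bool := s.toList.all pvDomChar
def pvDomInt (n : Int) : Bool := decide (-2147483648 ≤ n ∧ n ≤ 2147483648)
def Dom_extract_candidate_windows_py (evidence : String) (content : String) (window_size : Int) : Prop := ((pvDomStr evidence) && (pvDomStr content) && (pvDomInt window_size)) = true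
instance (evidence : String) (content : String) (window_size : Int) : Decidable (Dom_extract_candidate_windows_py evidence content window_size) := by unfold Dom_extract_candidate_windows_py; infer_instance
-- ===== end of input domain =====

-- B replaces A's repeated str.find scanning loop by a direct per-index slice-comparison scan over range(), capped once at the end; objective: alternative.


-- ===== PORT A =====
-- inner 'while pos >= 0 and len(windows) < 6' loop of A (start/end inlined into the slice)
def pvA_loop (content word : String) (window_size : Int) (windows : List String) (pos : Int) : List String :=
  if 0 ≤ pos ∧ windows.length < 6 then
    pvA_loop content word window_size
      (windows ++ [PySem.Str.slice content
        (some (max 0 (pos - PySem.Int.floordiv window_size 2)))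
        (some (min (PySem.Str.len content) (pos + PySem.Int.floordiv window_size 2)))])
      (PySem.Str.findFrom content word (pos + 1) none)
  else windows
termination_by 6 - windows.length
decreasing_by simp only [List.length_append, List.length_cons, List.length_nil]; omega

def extract_candidate_windows_py (evidence : String) (content : String) (window_size : Int) : List String :=
  let key_words := (PySem.List.slice (PySem.Str.split₀ evidence) none (some 5)).filter
    (fun w => decide (4 ≤ PySem.Str.len w))
  let windows := key_words.foldl
    (fun windows word => pvA_loop content word window_size windows (PySem.Str.find content word)) []
  if windows.isEmpty then [PySem.Str.slice content none (some window_size)] else windows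

-- ===== PORT B =====
-- B: for each keyword, test every index i of content by slice comparison content[i:i+len(w)] == w
-- (one flat comprehension over range(n - len(w) + 1)); cap with [:6] once at the end.
def extract_candidate_windows_py_alt (evidence : String) (content : String) (window_size : Int) : List String :=
  let key_words := (PySem.List.slice (PySem.Str.split₀ evidence) none (some 5)).filter
    (fun w => decide (4 ≤ PySem.Str.len w))
  let half := PySem.Int.floordiv window_size 2
  let n := PySem.Str.len content
  let windows := key_words.flatMap (fun w =>
    ((PySem.List.pyRange 0 (n - PySem.Str.len w + 1) 1).filter
        (fun i => PySem.Str.slice content (some i) (some (i + PySem.Str.len w)) == w)).map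
      (fun i => PySem.Str.slice content (some (max 0 (i - half))) (some (min n (i + half)))))
  let capped := PySem.List.slice windows none (some 6)
  if capped.isEmpty then [PySem.Str.slice content none (some window_size)] else capped

-- ===== PRECONDITION & SPEC =====
def Spec_extract_candidate_windows_py (evidence : String) (content : String) (window_size : Int) (out : List String) : Prop := out = extract_candidate_windows_py_alt evidence content window_size
instance (evidence : String) (content : String) (window_size : Int) (out : List String) : Decidable (Spec_extract_candidate_windows_py evidence content window_size out) := by unfold Spec_extract_candidate_windows_py; infer_instance

-- ===== CLAIM =====
def Claim_equal_extract_candidate_windows_py : Prop := ∀ (evidence : String) (content : String) (window_size : Int), Dom_extract_candidate_windows_py evidence content window_size → Spec_extract_candidate_windows_py evidence content window_size (extract_candidate_windows_py evidence content window_size)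

-- ===== LEMMAS AND PROOFS =====

-- measure for the find-chase (used only by proof-side helpers below)
def pvMeas (content : String) (pos : Int) : Nat :=
  if pos < 0 then 0 else content.toList.length + 2 - min pos.toNat (content.toList.length + 1)

theorem pvFindFrom_bounds (s sub : String) (st : Int) (h0 : 0 ≤ st)
    (hres : 0 ≤ PySem.Str.findFrom s sub st none) :
    st ≤ PySem.Str.findFrom s sub st none ∧ PySem.Str.findFrom s sub st none ≤ s.toList.length := by
  rw [PySem.Str.findFrom_eq] at hres ⊢
  unfold PySem.Chars.findFrom at hres ⊢
  have h1 : ¬ st < 0 := by omega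
  simp only [h1, if_false] at hres ⊢
  split_ifs at hres ⊢ with h2 h3
  · omega
  · omega
  · have ha := PySem.Chars.neg_one_le_find (List.drop st.toNat (List.take (↑s.toList.length : Int).toNat s.toList)) sub.toList
    have hb := PySem.Chars.find_le_length (List.drop st.toNat (List.take (↑s.toList.length : Int).toNat s.toList)) sub.toList
    have hlen : (List.drop st.toNat (List.take (↑s.toList.length : Int).toNat s.toList)).length = s.toList.length - st.toNat := by
      simp [List.length_drop, List.length_take]
    rw [hlen] at hb
    omega

theorem pvMeas_next (content word : String) (pos : Int) (h : 0 ≤ pos) :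
    pvMeas content (PySem.Str.findFrom content word (pos + 1) none) < pvMeas content pos := by
  unfold pvMeas
  by_cases hn : PySem.Str.findFrom content word (pos + 1) none < 0
  · rw [if_pos hn, if_neg (show ¬ pos < 0 by omega)]
    omega
  · have hb := pvFindFrom_bounds content word (pos + 1) (by omega) (by omega)
    rw [if_neg hn, if_neg (show ¬ pos < 0 by omega)]
    omega

-- proof-side: the ascending list of positions A's find-chase visits from pos
def pvPosList (content word : String) (pos : Int) : List Int :=
  if 0 ≤ pos then pos :: pvPosList content word (PySem.Str.findFrom content word (pos + 1) none)
  else []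
termination_by pvMeas content pos
decreasing_by exact pvMeas_next content word pos (by omega)

-- the window built at position p (the common slice expression of both ports)
def pvWin (content : String) (window_size : Int) (p : Int) : String :=
  PySem.Str.slice content (some (max 0 (p - PySem.Int.floordiv window_size 2)))
    (some (min (PySem.Str.len content) (p + PySem.Int.floordiv window_size 2)))

-- B's per-index match test
def pvPred (content word : String) (i : Int) : Bool :=
  PySem.Str.slice content (some i) (some (i + PySem.Str.len word)) == word

-- the match test is prefix-of-drop (for a nonnegative index)
theorem pvPred_iff (content word : String) (i : Int) (h : 0 ≤ i) :
    pvPred content word i = true ↔ word.toList <+: content.toList.drop i.toNat := by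
  unfold pvPred
  rw [beq_iff_eq, ← String.toList_inj, PySem.Str.toList_slice, PySem.Chars.slice_eq_listSlice]
  have hi : i = ((i.toNat : Nat) : Int) := by omega
  rw [PySem.Str.len_eq, hi, PySem.List.slice_natCast_add, List.prefix_iff_eq_take, eq_comm,
    Int.toNat_natCast]

-- A's find-chase from start k = B's filtered range from k (nonempty word)
theorem pvPosList_eq (content word : String) (hw : word.toList ≠ []) : ∀ (k : Nat),
    k ≤ content.toList.length →
    pvPosList content word (PySem.Str.findFrom content word (k : Int) none)
      = (PySem.List.pyRange (k : Int)
          ((content.toList.length : Int) - (word.toList.length : Int) + 1) 1).filter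
          (pvPred content word) := by
  intro k
  induction hm : content.toList.length - k using Nat.strong_induction_on generalizing k with
  | _ n ih =>
    intro hk
    by_cases hr : PySem.Str.findFrom content word (k : Int) none = -1
    · rw [pvPosList, if_neg (by omega)]
      have hninf : ¬ word.toList <:+: (content.toList.drop k) := by
        rw [PySem.Str.findFrom_eq] at hr
        exact (PySem.Chars.findFrom_natCast_eq_neg_one_iff content.toList word.toList k hk).mp hr
      symm
      rw [List.filter_eq_nil_iff]
      intro i hi hpi
      obtain ⟨hki, him⟩ := PySem.List.mem_pyRange_one.mp hi
      have hpref := (pvPred_iff content word i (by omega)).mp hpi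
      apply hninf
      rw [← PySem.Chars.isIn_iff_infix, ← PySem.Chars.exists_prefix_drop_iff_isIn]
      refine ⟨i.toNat - k, ?_⟩
      rw [List.drop_drop]
      have hkk : k + (i.toNat - k) = i.toNat := by omega
      rwa [hkk]
    · -- a match at r := findFrom; split the range at r and recurse after it
      rw [PySem.Str.findFrom_eq] at hr
      obtain ⟨hkr, hpre, hmin⟩ :=
        PySem.Chars.findFrom_natCast_spec content.toList word.toList k hk hr
      set r : Int := PySem.Chars.findFrom content.toList word.toList (k : Int) with hrdef
      have hr0 : 0 ≤ r := by omega
      have hrn : r ≤ content.toList.length := by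
        have := pvFindFrom_bounds content word (k : Int) (by omega)
          (by rw [PySem.Str.findFrom_eq, ← hrdef]; omega)
        rw [PySem.Str.findFrom_eq, ← hrdef] at this
        omega
      have hlen := hpre.length_le
      rw [List.length_drop] at hlen
      have hwpos : 0 < word.toList.length := List.length_pos_iff.mpr hw
      have hrm : r < (content.toList.length : Int) - (word.toList.length : Int) + 1 := by omega
      have hstep : pvPosList content word (PySem.Str.findFrom content word (k : Int) none) =
          r :: pvPosList content word (PySem.Str.findFrom content word (r + 1) none) := by
        rw [pvPosList]
        rw [PySem.Str.findFrom_eq, ← hrdef]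
        rw [if_pos hr0]
      rw [hstep]
      have hr1 : r + 1 = ((r.toNat + 1 : Nat) : Int) := by omega
      have ihr := ih (content.toList.length - (r.toNat + 1)) (by omega) (r.toNat + 1)
        rfl (by omega)
      rw [hr1, ihr, ← hr1]
      rw [PySem.List.pyRange_one_append (k : Int) r _ (by omega) (by omega),
        PySem.List.pyRange_one_cons hrm, List.filter_append]
      have hnil : (PySem.List.pyRange (k : Int) r 1).filter (pvPred content word) = [] := by
        rw [List.filter_eq_nil_iff]
        intro i hi hpi
        obtain ⟨hki, hir⟩ := PySem.List.mem_pyRange_one.mp hi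
        exact hmin i.toNat (by omega) (by omega) ((pvPred_iff content word i (by omega)).mp hpi)
      have hprt : pvPred content word r = true := by
        rw [pvPred_iff content word r hr0]
        exact hpre
      rw [hnil, List.filter_cons, if_pos hprt, List.nil_append]

-- A's capped inner loop = the full position list, mapped to windows, truncated to 6
theorem pvA_loop_eq (content word : String) (window_size : Int) : ∀ (pos : Int) (windows : List String),
    windows.length ≤ 6 →
    pvA_loop content word window_size windows pos
      = (windows ++ (pvPosList content word pos).map (pvWin content window_size)).take 6 := by
  intro pos
  induction hm : pvMeas content pos using Nat.strong_induction_on generalizing pos with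
  | _ n ih =>
    intro windows hw
    by_cases h : 0 ≤ pos
    · rw [pvPosList, if_pos h]
      by_cases h6 : windows.length < 6
      · rw [pvA_loop, if_pos ⟨h, h6⟩]
        have key := ih _ (hm ▸ pvMeas_next content word pos h) _ rfl
          (windows ++ [PySem.Str.slice content
            (some (max 0 (pos - PySem.Int.floordiv window_size 2)))
            (some (min (PySem.Str.len content) (pos + PySem.Int.floordiv window_size 2)))])
          (by simp only [List.length_append, List.length_cons, List.length_nil]; omega)
        rw [key]
        simp [pvWin, List.append_assoc]
      · rw [pvA_loop, if_neg (fun hc => h6 hc.2)]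
        rw [List.take_append_of_le_length (by omega), List.take_of_length_le (by omega)]
    · rw [pvA_loop, if_neg (fun hc => h hc.1), pvPosList, if_neg h]
      simp [List.take_of_length_le hw]

-- glue: truncating before appending more does not change the final truncation
theorem pvTake_take_append (n : Nat) (l r : List String) :
    ((l.take n) ++ r).take n = (l ++ r).take n := by
  by_cases hle : l.length ≤ n
  · rw [List.take_of_length_le hle]
  · rw [List.take_append_of_le_length (by simp; omega),
      List.take_append_of_le_length (by omega), List.take_take, min_self]

-- A's outer loop over key_words = flatMap of the position lists, then take 6
theorem pvFoldl_eq (content : String) (window_size : Int) : ∀ (kws : List String) (windows : List String),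
    windows.length ≤ 6 →
    kws.foldl (fun windows word => pvA_loop content word window_size windows (PySem.Str.find content word)) windows
      = (windows ++ kws.flatMap (fun w =>
          (pvPosList content w (PySem.Str.find content w)).map (pvWin content window_size))).take 6 := by
  intro kws
  induction kws with
  | nil =>
    intro windows hw
    simp [List.take_of_length_le hw]
  | cons w rest ih =>
    intro windows hw
    simp only [List.foldl_cons, List.flatMap_cons]
    rw [pvA_loop_eq content w window_size _ _ hw,
      ih _ (List.length_take_le 6 _),
      pvTake_take_append, List.append_assoc]

-- find = findFrom at 0
theorem pvFind_eq_findFrom_zero (content word : String) :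
    PySem.Str.find content word = PySem.Str.findFrom content word ((0 : Nat) : Int) none := by
  simp

theorem pv_main (evidence content : String) (window_size : Int) :
    extract_candidate_windows_py evidence content window_size
      = extract_candidate_windows_py_alt evidence content window_size := by
  have h6 : ∀ (xs : List String), PySem.List.slice xs none (some 6) = xs.take 6 := by
    intro xs
    rw [PySem.List.slice_to _ (by omega)]
    simp
  simp only [extract_candidate_windows_py, extract_candidate_windows_py_alt]
  rw [h6, pvFoldl_eq content window_size _ [] (by simp), List.nil_append]
  have hcong : ((PySem.List.slice (PySem.Str.split₀ evidence) none (some 5)).filter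
        (fun w => decide (4 ≤ PySem.Str.len w))).flatMap
      (fun w => (pvPosList content w (PySem.Str.find content w)).map (pvWin content window_size))
    = ((PySem.List.slice (PySem.Str.split₀ evidence) none (some 5)).filter
        (fun w => decide (4 ≤ PySem.Str.len w))).flatMap
      (fun w =>
        ((PySem.List.pyRange 0 ((PySem.Str.len content) - PySem.Str.len w + 1) 1).filter
            (fun i => PySem.Str.slice content (some i) (some (i + PySem.Str.len w)) == w)).map
          (fun i => PySem.Str.slice content
            (some (max 0 (i - PySem.Int.floordiv window_size 2)))
            (some (min (PySem.Str.len content) (i + PySem.Int.floordiv window_size 2))))) := by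
    apply List.flatMap_congr
    intro w hwmem
    have hlen : 4 ≤ PySem.Str.len w := by
      have := List.of_mem_filter hwmem
      simpa using this
    have hwne : w.toList ≠ [] := by
      rw [PySem.Str.len_eq] at hlen
      intro hnil
      rw [hnil] at hlen
      simp at hlen
    rw [pvFind_eq_findFrom_zero, pvPosList_eq content w hwne 0 (by omega)]
    unfold pvPred pvWin
    simp only [PySem.Str.len_eq, Nat.cast_zero]
  rw [hcong]

-- ===== VERDICT =====
theorem extract_candidate_windows_py_spec : Claim_equal_extract_candidate_windows_py := by
  intro evidence content window_size _
  unfold Spec_extract_candidate_windows_py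
  exact pv_main evidence content window_size
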